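-- pv_equiv track=rewrite | github.com/zoomlogo/siacB-abandoned | src/sparser.py | get_chars_bounds
-- ===== SOURCE A (Python) =====
-- def get_chars_bounds(string, chars):
--     # Get bounds for group of chars
--     in_range = False
--     end_index = None
--
--     i = 0
--     while i < len(string):
--         char = string[i]
--         if char in chars:
--             in_range = True
--         else:
--             if in_range:
--                 end_index = i
--                 break
--         i += 1
--
--     return end_index
-- ===== SOURCE B (Python) =====
-- def get_chars_bounds(string, chars):
--     # Two-phase: find first member index, then first non-member index after it.
--     start = next((i for i, c in enumerate(string) if c in chars), None)
--     if start is None: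
--         return None
--     return next((j for j in range(start + 1, len(string)) if string[j] not in chars), None)
-- ===== Notes on version B (the rewrite author's own statement) =====
-- stated objective: simpler
-- what changed: Replaces the flag-driven while loop with two sequential first-match searches: first member index via enumerate, then first non-member index after it.
import Mathlib
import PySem

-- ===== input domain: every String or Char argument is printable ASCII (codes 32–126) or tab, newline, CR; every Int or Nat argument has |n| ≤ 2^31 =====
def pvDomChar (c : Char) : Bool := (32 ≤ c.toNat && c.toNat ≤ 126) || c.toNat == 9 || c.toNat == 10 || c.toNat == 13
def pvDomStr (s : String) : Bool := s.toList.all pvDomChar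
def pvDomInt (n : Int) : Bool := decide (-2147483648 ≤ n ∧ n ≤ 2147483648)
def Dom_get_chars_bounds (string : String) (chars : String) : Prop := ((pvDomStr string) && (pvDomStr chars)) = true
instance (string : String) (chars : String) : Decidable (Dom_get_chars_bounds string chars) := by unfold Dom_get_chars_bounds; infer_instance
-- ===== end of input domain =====

-- B replaces A's flag-driven single loop by two sequential first-match searches (simpler decomposition); same return value everywhere.

-- ===== PORT A =====
-- A's while loop: state is (in_range, current index); 'break' returns some i.
def get_chars_bounds_loop (s : List Char) (chars : List Char) (in_range : Bool) (i : Int) : Option Int :=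
  match s with
  | [] => none
  | c :: rest =>
      if c ∈ chars then get_chars_bounds_loop rest chars true (i + 1)
      else if in_range then some i
      else get_chars_bounds_loop rest chars in_range (i + 1)

def get_chars_bounds (string : String) (chars : String) : Option Int :=
  get_chars_bounds_loop string.toList chars.toList false 0

-- ===== PORT B =====
-- first index i (counting from the given offset) whose char is in chars
def pvFindIn (s : List Char) (chars : List Char) (i : Int) : Option Int :=
  match s with
  | [] => none
  | c :: rest => if c ∈ chars then some i else pvFindIn rest chars (i + 1)

-- first index j from the given offset whose char is NOT in chars
def pvFindNotIn (s : List Char) (chars : List Char) (j : Int) : Option Int :=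
  match s with
  | [] => none
  | c :: rest => if c ∈ chars then pvFindNotIn rest chars (j + 1) else some j

def get_chars_bounds_alt (string : String) (chars : String) : Option Int :=
  match pvFindIn string.toList chars.toList 0 with
  | none => none
  | some start => pvFindNotIn (string.toList.drop (start.toNat + 1)) chars.toList (start + 1)

-- ===== PRECONDITION & SPEC =====
def Spec_get_chars_bounds (string : String) (chars : String) (out : Option Int) : Prop := out = get_chars_bounds_alt string chars
instance (string : String) (chars : String) (out : Option Int) : Decidable (Spec_get_chars_bounds string chars out) := by unfold Spec_get_chars_bounds; infer_instance

-- ===== CLAIM (what is proved, stated in full; the proofs are below) =====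
def Claim_equal_get_chars_bounds : Prop := ∀ (string : String) (chars : String), Dom_get_chars_bounds string chars → Spec_get_chars_bounds string chars (get_chars_bounds string chars)

-- ===== LEMMAS AND PROOFS =====

theorem pvFindIn_ge (s : List Char) (chars : List Char) (i st : Int)
    (h : pvFindIn s chars i = some st) : i ≤ st := by
  induction s generalizing i with
  | nil => simp [pvFindIn] at h
  | cons c rest ih =>
      simp only [pvFindIn] at h
      split at h
      · simp at h; omega
      · have := ih (i + 1) h; omega

theorem loop_true_eq (s : List Char) (chars : List Char) (i : Int) :
    get_chars_bounds_loop s chars true i = pvFindNotIn s chars i := by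
  induction s generalizing i with
  | nil => rfl
  | cons c rest ih =>
      simp only [get_chars_bounds_loop, pvFindNotIn]
      split <;> simp [ih]

theorem loop_false_eq (s : List Char) (chars : List Char) (i : Int) (hi : 0 ≤ i) :
    get_chars_bounds_loop s chars false i =
      match pvFindIn s chars i with
      | none => none
      | some st => pvFindNotIn (s.drop (st.toNat + 1 - i.toNat)) chars (st + 1) := by
  induction s generalizing i with
  | nil => rfl
  | cons c rest ih =>
      simp only [get_chars_bounds_loop, pvFindIn]
      by_cases hc : c ∈ chars
      · simp only [hc, if_pos]
        rw [loop_true_eq]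
        have : i.toNat + 1 - i.toNat = 1 := by omega
        simp [this]
      · simp only [hc, if_false]
        rw [ih (i + 1) (by omega)]
        cases hf : pvFindIn rest chars (i + 1) with
        | none => rfl
        | some st =>
            have hst := pvFindIn_ge rest chars (i + 1) st hf
            have h1 : st.toNat + 1 - i.toNat = (st.toNat + 1 - (i + 1).toNat) + 1 := by omega
            simp [h1]

theorem get_chars_bounds_spec' (string : String) (chars : String) :
    get_chars_bounds string chars = get_chars_bounds_alt string chars := by
  unfold get_chars_bounds get_chars_bounds_alt
  rw [loop_false_eq _ _ 0 le_rfl]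
  cases hf : pvFindIn string.toList chars.toList 0 with
  | none => rfl
  | some st => simp

-- ===== VERDICT (by name: the statement is the Claim_ definition above) =====
theorem get_chars_bounds_spec : Claim_equal_get_chars_bounds := by
  intro string chars _
  exact get_chars_bounds_spec' string chars
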